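/- GENERATED by mk_final_copies.py from the proof of the farm's unit `vorbis_decode_initial.9` (farm:vorbis_decode_initial.9.1: Proof.lean) as the
   re-elaboration sweep compiled it — do not edit. -/
import Asan.CheckWalk
import Vorbis.Spec.Units.vorbis_decode_initial_9

open X86 X86.User Asan Vorbis Vorbis.Spec Vorbis.Spec.vorbis_decode_initial

set_option maxRecDepth 4000
set_option maxHeartbeats 4000000

/-- Segment 9 of `vorbis_decode_initial` (0x1133c3–0x1133d1, 8 instructions: `add rsp, 28H`, six pops, `ret`): from `IAtEnd` to the contract's
`Returned`; the postcondition by `di_post_ok`. The farm worker's `epilogue`. -/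
theorem Vorbis.Spec.Worked.vorbis_decode_initial_9_ok : Vorbis.Spec.vorbis_decode_initial_9.Statement := by
  intro Lay hLay μ hμ u₀ hcode others frames len A stored room ysz u ret v hE hv
  have he := hE.entry
  have hpre := hE.pre
  v_entry he
  have hsp := hpre.1.rsp
  obtain ⟨w_rip, w_rsp, w_kept, w_eq, hsame, hun, hs0, hs1, hs2, hs3, hs4, hs5, hs6, hdf, hmx, hbits, hcbs, hcbe, hres, hdm⟩ := hv
  obtain ⟨z, w_rax⟩ : ∃ z, v.reg .rax = z := ⟨_, rfl⟩
  rw [w_rax] at hres hdm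
  have hinv := hpre.2.1
  have hrange := hinv.arena.block_range hinv.obj
  have hr8 := le_r8 Off.sizeof.stb_vorbis
  have hS := hinv.arena.AR2
  simp only [objBlock, Off.sizeof.stb_vorbis] at hrange hr8
  u_walk hcode [hμ.vendor] span [Vorbis.L.textLo, Vorbis.L.textHi] side (v_side)
  refine ReachVia.done ?_
  v_returned
  · -- the postcondition
    refine di_post_ok hpre (by omega) ?_ ?_ ?_ ?_ ?_ ?_ ?_
    · rw [w_mem]
      exact hsame
    · rw [w_mem]
      exact hun
    · rw [w_mem]
      exact hbits
    · rw [w_mem]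
      exact hcbs
    · rw [w_mem]
      exact hcbe
    · rw [w_rax]
      exact hres
    · rw [w_rax, w_mem]
      exact hdm
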